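-- pv_equiv track=rewrite | github.com/HenriqueMarinozzi/analisadorlexico | Analisador-Lexico/core/parseExpressao.py | estadoNumero
-- ===== SOURCE A (Python) =====
-- def estadoNumero(linha, i):
--   # Estado do AFD responsável por reconhecer números reais (com ponto)
--
--   numero = ''
--   ponto = False  # Controla ocorrência do ponto decimal
--
--   tamanho = len(linha)
--
--   while i < tamanho:
--
--     c = linha[i]
--
--     if c.isdigit():
--       numero += c
--       i += 1
--
--     elif c == '.':
--       # Permite apenas um ponto decimal
--       if ponto:
--         raise ValueError("Ponto redundante")
--
--       ponto = True
--       numero += c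
--       i += 1
--
--     else:
--       break
--
--   return numero, i
-- ===== SOURCE B (Python) =====
-- def estadoNumero(linha, i):
--   # Two-phase scan: advance an index over the digit/dot run, then slice and validate.
--   j = i
--   n = len(linha)
--   while j < n and (linha[j].isdigit() or linha[j] == '.'):
--     j += 1
--   token = linha[i:j]
--   if token.count('.') > 1:
--     raise ValueError("Ponto redundante")
--   return token, j
-- ===== Notes on version B (the rewrite author's own statement) =====
-- stated objective: simpler
-- what changed: Replaces the accumulating per-character DFA loop (building the token char by char while tracking a 'ponto' flag) by a two-phase scan: advance an index over the digit/dot run, take the token as one slice, then validate with count('.') > 1.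
-- intended difference: For negative start indices -len(linha) <= i < 0 whose whole suffix linha[i:] consists of digits/dots, A's index wraps past -1 to 0 and re-scans the beginning of the line, returning the suffix concatenated with the scanned prefix, while B returns the plain slice linha[i:j]; a negative start is an unspecified corner for this lexer state and B's slice-based value is the natural one. — e.g. on estadoNumero("1", -1): A returns ("11", 1), B returns ("1", 1)
import Mathlib
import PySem

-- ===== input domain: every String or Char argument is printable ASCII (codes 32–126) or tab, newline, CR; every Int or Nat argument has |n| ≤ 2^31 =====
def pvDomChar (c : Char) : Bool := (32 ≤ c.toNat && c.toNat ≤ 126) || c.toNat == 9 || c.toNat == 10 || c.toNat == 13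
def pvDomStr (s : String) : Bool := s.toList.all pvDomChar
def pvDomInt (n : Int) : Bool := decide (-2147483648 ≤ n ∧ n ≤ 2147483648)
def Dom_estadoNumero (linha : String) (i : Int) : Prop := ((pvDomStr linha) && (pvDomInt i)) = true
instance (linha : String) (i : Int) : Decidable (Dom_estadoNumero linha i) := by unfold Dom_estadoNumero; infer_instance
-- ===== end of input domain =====

-- B replaces A's accumulating per-character DFA loop by a two-phase scan (advance an index over
-- the digit/dot run, slice the token, validate with count('.') > 1); same cost, simpler shape.


-- ===== PORT A =====
-- A's while-loop: index i, accumulator `numero`, flag `ponto`; the two raise sites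
-- (IndexError on linha[i], ValueError "Ponto redundante") return a junk value ("",0) —
-- both are excluded by Pre_estadoNumero.
def estadoNumeroLoop (cs : List Char) (fuel : Nat) (numero : List Char) (ponto : Bool) (i : Int) : List Char × Int :=
  match fuel with
  | 0 => (numero, i)
  | fuel + 1 =>
    if i < (cs.length : Int) then
      match PySem.List.pyGet? cs i with
      | none => ([], 0)                 -- IndexError (outside Pre_)
      | some c =>
        if PySem.Chars.isdigit c then
          estadoNumeroLoop cs fuel (numero ++ [c]) ponto (i + 1)
        else if c == '.' then
          if ponto then ([], 0)          -- raise ValueError "Ponto redundante" (outside Pre_)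
          else estadoNumeroLoop cs fuel (numero ++ [c]) true (i + 1)
        else (numero, i)
    else (numero, i)

def estadoNumero (linha : String) (i : Int) : String × Int :=
  let cs := linha.toList
  let r := estadoNumeroLoop cs (((cs.length : Int) - i).toNat + 1) [] false i
  (String.ofList r.1, r.2)

-- ===== PORT B =====
-- B's first phase: advance j over the digit/dot run (a linha[j] IndexError is outside Pre_).
def estadoNumeroAltScan (cs : List Char) (fuel : Nat) (j : Int) : Int :=
  match fuel with
  | 0 => j
  | fuel + 1 =>
    if j < (cs.length : Int) then
      match PySem.List.pyGet? cs j with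
      | none => j                       -- IndexError (outside Pre_)
      | some c =>
        if PySem.Chars.isdigit c || c == '.' then estadoNumeroAltScan cs fuel (j + 1) else j
    else j

def estadoNumero_alt (linha : String) (i : Int) : String × Int :=
  let cs := linha.toList
  let j := estadoNumeroAltScan cs (((cs.length : Int) - i).toNat + 1) i
  let token := PySem.List.slice cs (some i) (some j)
  if 1 < PySem.Chars.count token ['.'] then ("", 0)   -- raise ValueError (outside Pre_)
  else (String.ofList token, j)

-- ===== PRECONDITION & SPEC =====
-- Pre_ excludes exactly the inputs on which A raises: an IndexError for i < -len(linha)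
-- (with i < len(linha)), and the ValueError on a second '.' inside the scanned digit/dot
-- run (for negative i the scanned stream wraps: the suffix from len+i followed by the line).
def Pre_estadoNumero (linha : String) (i : Int) : Prop :=
  if 0 ≤ i then
    ((linha.toList.drop i.toNat).takeWhile
        (fun c => PySem.Chars.isdigit c || c == '.')).count '.' ≤ 1
  else
    -(linha.toList.length : Int) ≤ i ∧
    (((linha.toList.drop ((linha.toList.length : Int) + i).toNat) ++ linha.toList).takeWhile
        (fun c => PySem.Chars.isdigit c || c == '.')).count '.' ≤ 1
instance (linha : String) (i : Int) : Decidable (Pre_estadoNumero linha i) := by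
  unfold Pre_estadoNumero; infer_instance

def pvWitness_estadoNumero : String × Int := ("12.5x", 0)

-- For -len(linha) ≤ i < 0 with the whole suffix linha[i:] made of digits/dots, A's index wraps
-- past -1 to 0 and re-scans the beginning of the line (returning suffix ++ scanned prefix),
-- while B returns the plain slice linha[i:j]; a negative start is an unspecified corner for
-- this lexer state and B's slice-based value is the natural one.
def D_estadoNumero (linha : String) (i : Int) : Prop :=
  i < 0 ∧ -(linha.toList.length : Int) ≤ i ∧
  (linha.toList.drop ((linha.toList.length : Int) + i).toNat).all
    (fun c => PySem.Chars.isdigit c || c == '.') = true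
instance (linha : String) (i : Int) : Decidable (D_estadoNumero linha i) := by
  unfold D_estadoNumero; infer_instance

def Spec_estadoNumero (linha : String) (i : Int) (out : String × Int) : Prop :=
  ¬ D_estadoNumero linha i → out = estadoNumero_alt linha i
instance (linha : String) (i : Int) (out : String × Int) : Decidable (Spec_estadoNumero linha i out) := by
  unfold Spec_estadoNumero; infer_instance

def pvDiffWitness_estadoNumero : String × Int := ("1", -1)
def pvDiffWitnessOut_estadoNumero : (String × Int) × (String × Int) := (("11", 1), ("1", 1))

-- ===== CLAIM (what is proved, stated in full; the proofs are below) =====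
def Claim_unchanged_estadoNumero : Prop := ∀ (linha : String) (i : Int), Dom_estadoNumero linha i → Pre_estadoNumero linha i → Spec_estadoNumero linha i (estadoNumero linha i)
def Claim_changed_estadoNumero : Prop := Dom_estadoNumero (pvDiffWitness_estadoNumero.1) (pvDiffWitness_estadoNumero.2) ∧ Pre_estadoNumero (pvDiffWitness_estadoNumero.1) (pvDiffWitness_estadoNumero.2) ∧ D_estadoNumero (pvDiffWitness_estadoNumero.1) (pvDiffWitness_estadoNumero.2) ∧ estadoNumero (pvDiffWitness_estadoNumero.1) (pvDiffWitness_estadoNumero.2) = pvDiffWitnessOut_estadoNumero.1 ∧ estadoNumero_alt (pvDiffWitness_estadoNumero.1) (pvDiffWitness_estadoNumero.2) = pvDiffWitnessOut_estadoNumero.2 ∧ pvDiffWitnessOut_estadoNumero.1 ≠ pvDiffWitnessOut_estadoNumero.2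
def Claim_exact_estadoNumero : Prop := ∀ (linha : String) (i : Int), Dom_estadoNumero linha i → Pre_estadoNumero linha i → D_estadoNumero linha i → estadoNumero linha i ≠ estadoNumero_alt linha i


-- ===== LEMMAS AND PROOFS =====

-- the character class scanned by both programs
def pvP (c : Char) : Bool := PySem.Chars.isdigit c || c == '.'

theorem pvP_eq : (fun c => PySem.Chars.isdigit c || c == '.') = pvP := rfl

theorem pv_isdigit_ne_dot (c : Char) (h : PySem.Chars.isdigit c = true) : (c == '.') = false := by
  rcases eq_or_ne c '.' with rfl | hne
  · simp [PySem.Chars.isdigit] at h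
  · simp [hne]

-- str.count for a single-character needle is List.count
theorem pv_countGo (c : Char) (l : List Char) (fuel acc : Nat) (h : l.length <= fuel) :
    PySem.Chars.count.go [c] fuel l acc = acc + l.count c := by
  induction fuel generalizing l acc with
  | zero =>
    have : l = [] := by cases l <;> simp_all
    subst this; simp [PySem.Chars.count.go]
  | succ fuel ih =>
    cases l with
    | nil => simp [PySem.Chars.count.go]
    | cons a t =>
      by_cases hc : a = c
      · subst hc
        have hpre : List.isPrefixOf [a] (a :: t) = true := by simp [List.isPrefixOf]
        simp only [PySem.Chars.count.go, hpre, if_true, List.length_cons, List.drop_succ_cons,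
          List.length_nil, List.drop_zero]
        rw [ih t (acc + 1) (by simpa using Nat.le_of_succ_le_succ h)]
        simp [List.count_cons]
        omega
      · have hpre : List.isPrefixOf [c] (a :: t) = false := by
          simp [List.isPrefixOf]; exact fun hq => absurd hq.symm hc
        simp only [PySem.Chars.count.go, hpre, Bool.false_eq_true, if_false]
        rw [ih t acc (by simpa using Nat.le_of_succ_le_succ h)]
        simp [List.count_cons, hc]
  
theorem pv_count_singleton (c : Char) (l : List Char) :
    PySem.Chars.count l [c] = l.count c := by
  simp [PySem.Chars.count, pv_countGo c l l.length 0 le_rfl]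


-- A's loop from a nonnegative index k consumes exactly the digit/dot run of cs.drop k,
-- provided the run (plus an already-seen dot) has at most one '.'
theorem pvA_nonneg (cs : List Char) (fuel k : Nat) (numero : List Char) (ponto : Bool)
    (hf : cs.length ≤ k + fuel)
    (hc : ((cs.drop k).takeWhile pvP).count '.' + (if ponto then 1 else 0) ≤ 1) :
    estadoNumeroLoop cs fuel numero ponto (k : Int)
      = (numero ++ (cs.drop k).takeWhile pvP,
         (k : Int) + ((cs.drop k).takeWhile pvP).length) := by
  induction fuel generalizing k numero ponto with
  | zero =>
    have hnil : cs.drop k = [] := List.drop_eq_nil_of_le (by omega)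
    simp [estadoNumeroLoop, hnil]
  | succ fuel ih =>
    by_cases hk : k < cs.length
    · have hklt : (k : Int) < (cs.length : Int) := by exact_mod_cast hk
      have hget : PySem.List.pyGet? cs (k : Int) = some cs[k] := by
        simp [List.getElem?_eq_getElem hk]
      have hdrop : cs.drop k = cs[k] :: cs.drop (k + 1) := (List.getElem_cons_drop hk).symm
      have hcast : (k : Int) + 1 = ((k + 1 : Nat) : Int) := by push_cast; ring
      by_cases hd : PySem.Chars.isdigit cs[k]
      · have hp : pvP cs[k] = true := by simp [pvP, hd]
        have hne : (cs[k] == '.') = false := pv_isdigit_ne_dot _ hd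
        have htw : (cs.drop k).takeWhile pvP = cs[k] :: (cs.drop (k + 1)).takeWhile pvP := by
          rw [hdrop, List.takeWhile_cons, if_pos hp]
        have hc' : ((cs.drop (k + 1)).takeWhile pvP).count '.' + (if ponto then 1 else 0) ≤ 1 := by
          rw [htw] at hc; simp [List.count_cons] at hc ⊢; omega
        simp only [estadoNumeroLoop, hklt, if_true, hget, hd]
        rw [hcast, ih (k + 1) (numero ++ [cs[k]]) ponto (by omega) hc']
        rw [htw]
        simp only [Prod.mk.injEq, List.append_assoc, List.singleton_append, List.length_cons,
          true_and]
        push_cast; omega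
      · by_cases hdot : cs[k] = '.'
        · have hp : pvP cs[k] = true := by simp [pvP, hdot]
          have htw : (cs.drop k).takeWhile pvP = cs[k] :: (cs.drop (k + 1)).takeWhile pvP := by
            rw [hdrop, List.takeWhile_cons, if_pos hp]
          have hcnt : ((cs.drop k).takeWhile pvP).count '.'
              = ((cs.drop (k + 1)).takeWhile pvP).count '.' + 1 := by
            rw [htw]; simp [List.count_cons, hdot]
          have hpf : ponto = false := by
            cases ponto with
            | false => rfl
            | true => rw [hcnt] at hc; simp at hc
          subst hpf
          have hc' : ((cs.drop (k + 1)).takeWhile pvP).count '.' + (if true then 1 else 0) ≤ 1 := by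
            simp; omega
          simp only [estadoNumeroLoop, hklt, if_true, hget, hd, hdot, beq_self_eq_true,
            Bool.false_eq_true, if_false, show PySem.Chars.isdigit '.' = false from by decide]
          rw [hcast, ih (k + 1) (numero ++ ['.']) true (by omega) hc']
          rw [htw]
          simp only [hdot, Prod.mk.injEq, List.append_assoc, List.singleton_append,
            List.length_cons, true_and]
          push_cast; omega
        · have hp : pvP cs[k] = false := by simp [pvP, hd, hdot]
          have htw : (cs.drop k).takeWhile pvP = [] := by
            rw [hdrop, List.takeWhile_cons, if_neg (by simp [hp])]
          simp [estadoNumeroLoop, hklt, List.getElem?_eq_getElem hk, hd, hdot, htw]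
    · have hnil : cs.drop k = [] := List.drop_eq_nil_of_le (by omega)
      have : ¬ ((k : Int) < (cs.length : Int)) := by exact_mod_cast hk
      simp [estadoNumeroLoop, this, hnil]

-- B's scan from a nonnegative index k stops right after the digit/dot run
theorem pvB_nonneg (cs : List Char) (fuel k : Nat) (hf : cs.length ≤ k + fuel) :
    estadoNumeroAltScan cs fuel (k : Int)
      = (k : Int) + ((cs.drop k).takeWhile pvP).length := by
  induction fuel generalizing k with
  | zero =>
    have hnil : cs.drop k = [] := List.drop_eq_nil_of_le (by omega)
    simp [estadoNumeroAltScan, hnil]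
  | succ fuel ih =>
    by_cases hk : k < cs.length
    · have hklt : (k : Int) < (cs.length : Int) := by exact_mod_cast hk
      have hget : PySem.List.pyGet? cs (k : Int) = some cs[k] := by
        simp [List.getElem?_eq_getElem hk]
      have hdrop : cs.drop k = cs[k] :: cs.drop (k + 1) := (List.getElem_cons_drop hk).symm
      have hcast : (k : Int) + 1 = ((k + 1 : Nat) : Int) := by push_cast; ring
      by_cases hp : pvP cs[k]
      · have htw : (cs.drop k).takeWhile pvP = cs[k] :: (cs.drop (k + 1)).takeWhile pvP := by
          rw [hdrop, List.takeWhile_cons, if_pos hp]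
        simp only [estadoNumeroAltScan, hklt, if_true, hget,
          show (PySem.Chars.isdigit cs[k] || cs[k] == '.') = true from hp]
        rw [hcast, ih (k + 1) (by omega), htw]
        simp; push_cast; omega
      · have htw : (cs.drop k).takeWhile pvP = [] := by
          rw [hdrop, List.takeWhile_cons, if_neg (by simp [hp])]
        simp [estadoNumeroAltScan, hklt, List.getElem?_eq_getElem hk,
          show (PySem.Chars.isdigit cs[k] || cs[k] == '.') = false from by simpa [pvP] using hp,
          htw]
    · have hnil : cs.drop k = [] := List.drop_eq_nil_of_le (by omega)
      have : ¬ ((k : Int) < (cs.length : Int)) := by exact_mod_cast hk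
      simp [estadoNumeroAltScan, this, hnil]

-- linha[i] for -len ≤ i < 0 reads the wrapped position
theorem pv_get_neg (cs : List Char) (m : Nat) (hm : m < cs.length) :
    PySem.List.pyGet? cs ((m : Int) - cs.length) = some cs[m] := by
  have h := PySem.List.pyGet?_neg_natCast cs (cs.length - m) (by omega) (by omega)
  have hcast : -(((cs.length - m : Nat)) : Int) = (m : Int) - cs.length := by
    push_cast [Nat.cast_sub (le_of_lt hm)]; ring
  rw [hcast] at h
  rw [h]
  have : cs.length - (cs.length - m) = m := by omega
  rw [this, List.getElem?_eq_getElem hm]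

-- A's loop from a negative index that stops strictly inside the suffix
theorem pvA_neg (cs : List Char) (fuel m : Nat) (numero : List Char) (ponto : Bool)
    (hm : m < cs.length) (hf : cs.length ≤ m + fuel)
    (hstop : ((cs.drop m).takeWhile pvP).length < (cs.drop m).length)
    (hc : ((cs.drop m).takeWhile pvP).count '.' + (if ponto then 1 else 0) ≤ 1) :
    estadoNumeroLoop cs fuel numero ponto ((m : Int) - cs.length)
      = (numero ++ (cs.drop m).takeWhile pvP,
         ((m : Int) - cs.length) + ((cs.drop m).takeWhile pvP).length) := by
  induction fuel generalizing m numero ponto with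
  | zero => omega
  | succ fuel ih =>
    have hklt : (m : Int) - cs.length < (cs.length : Int) := by omega
    have hget : PySem.List.pyGet? cs ((m : Int) - cs.length) = some cs[m] := pv_get_neg cs m hm
    have hdrop : cs.drop m = cs[m] :: cs.drop (m + 1) := (List.getElem_cons_drop hm).symm
    have hcast : ((m : Int) - cs.length) + 1 = ((m + 1 : Nat) : Int) - cs.length := by
      push_cast; ring
    by_cases hp : pvP cs[m]
    · have htw : (cs.drop m).takeWhile pvP = cs[m] :: (cs.drop (m + 1)).takeWhile pvP := by
        rw [hdrop, List.takeWhile_cons, if_pos hp]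
      have hlen : (cs.drop (m + 1)).length = cs.length - (m + 1) := List.length_drop
      have hstop' : ((cs.drop (m + 1)).takeWhile pvP).length < (cs.drop (m + 1)).length := by
        rw [htw, hdrop] at hstop; simp only [List.length_cons] at hstop; omega
      have hm' : m + 1 < cs.length := by omega
      by_cases hd : PySem.Chars.isdigit cs[m]
      · have hne : (cs[m] == '.') = false := pv_isdigit_ne_dot _ hd
        have hc' : ((cs.drop (m + 1)).takeWhile pvP).count '.' + (if ponto then 1 else 0) ≤ 1 := by
          rw [htw] at hc; simp [List.count_cons] at hc ⊢; omega
        simp only [estadoNumeroLoop, hklt, if_true, hget, hd]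
        rw [hcast, ih (m + 1) (numero ++ [cs[m]]) ponto hm' (by omega) hstop' hc']
        rw [htw]
        simp only [Prod.mk.injEq, List.append_assoc, List.singleton_append, List.length_cons,
          true_and]
        push_cast; omega
      · have hdot : cs[m] = '.' := by
          simp [pvP, hd] at hp; simpa using hp
        have hcnt : ((cs.drop m).takeWhile pvP).count '.'
            = ((cs.drop (m + 1)).takeWhile pvP).count '.' + 1 := by
          rw [htw]; simp [hdot]
        have hpf : ponto = false := by
          cases ponto with
          | false => rfl
          | true => rw [hcnt] at hc; simp at hc
        subst hpf
        have hc' : ((cs.drop (m + 1)).takeWhile pvP).count '.' + (if true then 1 else 0) ≤ 1 := by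
          simp; omega
        simp only [estadoNumeroLoop, hklt, if_true, hget, hd, hdot, beq_self_eq_true,
          Bool.false_eq_true, if_false, show PySem.Chars.isdigit '.' = false from by decide]
        rw [hcast, ih (m + 1) (numero ++ ['.']) true hm' (by omega) hstop' hc']
        rw [htw]
        simp only [hdot, Prod.mk.injEq, List.append_assoc, List.singleton_append,
          List.length_cons, true_and]
        push_cast; omega
    · have htw : (cs.drop m).takeWhile pvP = [] := by
        rw [hdrop, List.takeWhile_cons, if_neg (by simp [hp])]
      have hd : PySem.Chars.isdigit cs[m] = false := by
        simp [pvP] at hp; exact hp.1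
      have hdot : ¬ (cs[m] = '.') := by
        simp [pvP] at hp; simpa using hp.2
      simp [estadoNumeroLoop, hklt, hget, hd, hdot, htw]

-- B's scan from a negative index that stops strictly inside the suffix
theorem pvB_neg (cs : List Char) (fuel m : Nat)
    (hm : m < cs.length) (hf : cs.length ≤ m + fuel)
    (hstop : ((cs.drop m).takeWhile pvP).length < (cs.drop m).length) :
    estadoNumeroAltScan cs fuel ((m : Int) - cs.length)
      = ((m : Int) - cs.length) + ((cs.drop m).takeWhile pvP).length := by
  induction fuel generalizing m with
  | zero => omega
  | succ fuel ih =>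
    have hklt : (m : Int) - cs.length < (cs.length : Int) := by omega
    have hget : PySem.List.pyGet? cs ((m : Int) - cs.length) = some cs[m] := pv_get_neg cs m hm
    have hdrop : cs.drop m = cs[m] :: cs.drop (m + 1) := (List.getElem_cons_drop hm).symm
    have hcast : ((m : Int) - cs.length) + 1 = ((m + 1 : Nat) : Int) - cs.length := by
      push_cast; ring
    by_cases hp : pvP cs[m]
    · have htw : (cs.drop m).takeWhile pvP = cs[m] :: (cs.drop (m + 1)).takeWhile pvP := by
        rw [hdrop, List.takeWhile_cons, if_pos hp]
      have hstop' : ((cs.drop (m + 1)).takeWhile pvP).length < (cs.drop (m + 1)).length := by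
        rw [htw, hdrop] at hstop; simp only [List.length_cons] at hstop; omega
      have hm' : m + 1 < cs.length := by
        have hlen : (cs.drop (m + 1)).length = cs.length - (m + 1) := List.length_drop
        omega
      simp only [estadoNumeroAltScan, hklt, if_true, hget,
        show (PySem.Chars.isdigit cs[m] || cs[m] == '.') = true from hp]
      rw [hcast, ih (m + 1) hm' (by omega) hstop', htw]
      simp only [List.length_cons]
      push_cast; omega
    · have htw : (cs.drop m).takeWhile pvP = [] := by
        rw [hdrop, List.takeWhile_cons, if_neg (by simp [hp])]
      simp [estadoNumeroAltScan, hklt, hget,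
        show (PySem.Chars.isdigit cs[m] || cs[m] == '.') = false from by simpa [pvP] using hp,
        htw]

-- A's loop consumes an all-digit/dot suffix and wraps to index 0
theorem pvA_wrap (cs : List Char) (fuel d m : Nat) (numero : List Char) (ponto : Bool)
    (hdm : m + d = cs.length)
    (hall : ∀ x ∈ cs.drop m, pvP x = true)
    (hc : (cs.drop m).count '.' + (if ponto then 1 else 0) ≤ 1) :
    estadoNumeroLoop cs (d + fuel) numero ponto ((m : Int) - cs.length)
      = estadoNumeroLoop cs fuel (numero ++ cs.drop m)
          (ponto || (cs.drop m).contains '.') 0 := by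
  induction d generalizing m numero ponto with
  | zero =>
    have hnil : cs.drop m = [] := List.drop_eq_nil_of_le (by omega)
    have h0 : ((m : Int) - cs.length) = 0 := by omega
    simp [hnil, h0]
  | succ d ih =>
    have hm : m < cs.length := by omega
    have hklt : (m : Int) - cs.length < (cs.length : Int) := by omega
    have hget : PySem.List.pyGet? cs ((m : Int) - cs.length) = some cs[m] := pv_get_neg cs m hm
    have hdrop : cs.drop m = cs[m] :: cs.drop (m + 1) := (List.getElem_cons_drop hm).symm
    have hcast : ((m : Int) - cs.length) + 1 = ((m + 1 : Nat) : Int) - cs.length := by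
      push_cast; ring
    have hp : pvP cs[m] = true := hall cs[m] (by rw [hdrop]; exact List.mem_cons_self ..)
    have hall' : ∀ x ∈ cs.drop (m + 1), pvP x = true := by
      intro x hx; exact hall x (by rw [hdrop]; exact List.mem_cons_of_mem _ hx)
    have hfuel : d + 1 + fuel = (d + fuel) + 1 := by omega
    rw [hfuel]
    by_cases hd : PySem.Chars.isdigit cs[m]
    · have hne : (cs[m] == '.') = false := pv_isdigit_ne_dot _ hd
      have hnedot : ¬ (cs[m] = '.') := by simpa using hne
      have hc' : (cs.drop (m + 1)).count '.' + (if ponto then 1 else 0) ≤ 1 := by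
        have hcnt : (cs.drop m).count '.' = (cs.drop (m + 1)).count '.' := by
          rw [hdrop, List.count_cons, hne]; simp
        omega
      simp only [estadoNumeroLoop, hklt, if_true, hget, hd]
      rw [hcast, ih (m + 1) (numero ++ [cs[m]]) ponto (by omega) hall' hc']
      have hne' : ('.' == cs[m]) = false := by simpa using Ne.symm hnedot
      have hcont : (cs.drop m).contains '.' = (cs.drop (m + 1)).contains '.' := by
        rw [hdrop, List.contains_cons, hne']; simp
      have harg : numero ++ [cs[m]] ++ cs.drop (m + 1) = numero ++ cs.drop m := by
        rw [hdrop]; simp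
      rw [harg, hcont]
    · have hdot : cs[m] = '.' := by
        simp [pvP, hd] at hp; simpa using hp
      have hcnt : (cs.drop m).count '.' = (cs.drop (m + 1)).count '.' + 1 := by
        rw [hdrop, List.count_cons, hdot]; simp
      have hpf : ponto = false := by
        cases ponto with
        | false => rfl
        | true => rw [hcnt] at hc; simp at hc
      subst hpf
      have hc' : (cs.drop (m + 1)).count '.' + (if true then 1 else 0) ≤ 1 := by
        simp; omega
      simp only [estadoNumeroLoop, hklt, if_true, hget, hd, hdot, beq_self_eq_true,
        Bool.false_eq_true, if_false, show PySem.Chars.isdigit '.' = false from by decide]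
      rw [hcast, ih (m + 1) (numero ++ ['.']) true (by omega) hall' hc']
      have hcont : (cs.drop m).contains '.' = true := by
        rw [hdrop, List.contains_cons, hdot]; simp
      have harg : numero ++ ['.'] ++ cs.drop (m + 1) = numero ++ cs.drop m := by
        rw [hdrop, hdot]; simp
      rw [harg, hcont]
      simp

-- B's scan consumes an all-digit/dot suffix and wraps to index 0
theorem pvB_wrap (cs : List Char) (fuel d m : Nat)
    (hdm : m + d = cs.length)
    (hall : ∀ x ∈ cs.drop m, pvP x = true) :
    estadoNumeroAltScan cs (d + fuel) ((m : Int) - cs.length)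
      = estadoNumeroAltScan cs fuel 0 := by
  induction d generalizing m with
  | zero =>
    have h0 : ((m : Int) - cs.length) = 0 := by omega
    rw [h0, Nat.zero_add]
  | succ d ih =>
    have hm : m < cs.length := by omega
    have hklt : (m : Int) - cs.length < (cs.length : Int) := by omega
    have hget : PySem.List.pyGet? cs ((m : Int) - cs.length) = some cs[m] := pv_get_neg cs m hm
    have hdrop : cs.drop m = cs[m] :: cs.drop (m + 1) := (List.getElem_cons_drop hm).symm
    have hcast : ((m : Int) - cs.length) + 1 = ((m + 1 : Nat) : Int) - cs.length := by
      push_cast; ring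
    have hp : pvP cs[m] = true := hall cs[m] (by rw [hdrop]; exact List.mem_cons_self ..)
    have hall' : ∀ x ∈ cs.drop (m + 1), pvP x = true := by
      intro x hx; exact hall x (by rw [hdrop]; exact List.mem_cons_of_mem _ hx)
    have hfuel : d + 1 + fuel = (d + fuel) + 1 := by omega
    rw [hfuel]
    simp only [estadoNumeroAltScan, hklt, if_true, hget,
      show (PySem.Chars.isdigit cs[m] || cs[m] == '.') = true from hp]
    rw [hcast, ih (m + 1) (by omega) hall']

theorem pv_take_takeWhile (l : List Char) : l.take ((l.takeWhile pvP).length) = l.takeWhile pvP :=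
  (List.prefix_iff_eq_take.mp (List.takeWhile_prefix pvP)).symm

-- slice linha[i:j] for wrapped-but-unwrapping-free negative bounds
theorem pv_clampIdx_neg (n : Nat) (i : Int) (h0 : i < 0) (h1 : -(n : Int) ≤ i) :
    PySem.List.clampIdx n i = ((n : Int) + i).toNat := by
  unfold PySem.List.clampIdx
  rw [if_pos h0, if_neg (by omega)]

-- A = B on every admitted input outside the change region
theorem pv_main (linha : String) (i : Int)
    (hpre : Pre_estadoNumero linha i) (hnd : ¬ D_estadoNumero linha i) :
    estadoNumero linha i = estadoNumero_alt linha i := by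
  unfold Pre_estadoNumero at hpre
  unfold D_estadoNumero at hnd
  simp only [pvP_eq] at hpre hnd
  simp only [estadoNumero, estadoNumero_alt]
  set cs := linha.toList with hcs
  by_cases hi : 0 ≤ i
  · obtain ⟨k, rfl⟩ : ∃ k : Nat, i = (k : Int) := ⟨i.toNat, (Int.toNat_of_nonneg hi).symm⟩
    rw [if_pos hi] at hpre
    simp only [Int.toNat_natCast] at hpre ⊢
    have hfA : cs.length ≤ k + (((cs.length : Int) - (k : Int)).toNat + 1) := by omega
    have hA := pvA_nonneg cs (((cs.length : Int) - (k : Int)).toNat + 1) k [] false hfA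
      (by simpa using hpre)
    have hB := pvB_nonneg cs (((cs.length : Int) - (k : Int)).toNat + 1) k hfA
    simp only [List.nil_append] at hA
    rw [hA, hB]
    have hslice : PySem.List.slice cs (some (k : Int))
        (some ((k : Int) + (((cs.drop k).takeWhile pvP).length : Int)))
        = (cs.drop k).takeWhile pvP := by
      rw [PySem.List.slice_natCast_add, pv_take_takeWhile]
    rw [hslice, pv_count_singleton]
    rw [if_neg (by omega)]
  · rw [if_neg hi] at hpre
    obtain ⟨hge, hcnt⟩ := hpre
    have hn0 : 0 < cs.length := by omega
    have hmi : ((((cs.length : Int) + i).toNat : Nat) : Int) - cs.length = i := by omega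
    have hmlt : ((cs.length : Int) + i).toNat < cs.length := by omega
    set m := ((cs.length : Int) + i).toNat with hm
    have hnall : ¬ ((cs.drop m).all pvP = true) := fun hall =>
      hnd ⟨by omega, hge, hall⟩
    have hstop : ((cs.drop m).takeWhile pvP).length < (cs.drop m).length := by
      have hne : (cs.drop m).takeWhile pvP ≠ cs.drop m := by
        intro he
        exact hnall (List.all_eq_true.mpr (List.takeWhile_eq_self_iff.mp he))
      have hle := (List.takeWhile_prefix (p := pvP) (l := cs.drop m)).length_le
      rcases Nat.lt_or_ge ((cs.drop m).takeWhile pvP).length (cs.drop m).length with h | h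
      · exact h
      · exact absurd ((List.takeWhile_prefix pvP).eq_of_length (by omega)) hne
    have hstream : ((cs.drop m ++ cs).takeWhile pvP) = (cs.drop m).takeWhile pvP := by
      rw [List.takeWhile_append, if_neg (by omega)]
    rw [hstream] at hcnt
    have hfA : cs.length ≤ m + (((cs.length : Int) - i).toNat + 1) := by omega
    have hA := pvA_neg cs (((cs.length : Int) - i).toNat + 1) m [] false hmlt hfA hstop
      (by simpa using hcnt)
    have hB := pvB_neg cs (((cs.length : Int) - i).toNat + 1) m hmlt hfA hstop
    rw [hmi] at hA hB
    simp only [List.nil_append] at hA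
    rw [hA, hB]
    have hslice : PySem.List.slice cs (some i)
        (some (i + (((cs.drop m).takeWhile pvP).length : Int)))
        = (cs.drop m).takeWhile pvP := by
      have hlen : (cs.drop m).length = cs.length - m := List.length_drop
      have hj0 : i + (((cs.drop m).takeWhile pvP).length : Int) < 0 := by omega
      have hja : PySem.List.clampIdx cs.length
          (i + (((cs.drop m).takeWhile pvP).length : Int))
          = m + ((cs.drop m).takeWhile pvP).length := by
        rw [pv_clampIdx_neg _ _ hj0 (by omega)]; omega
      have hia : PySem.List.clampIdx cs.length i = m := by
        rw [pv_clampIdx_neg _ _ (by omega) hge]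
      simp only [PySem.List.slice]
      rw [hia, hja]
      have h2 : m + ((cs.drop m).takeWhile pvP).length - m
          = ((cs.drop m).takeWhile pvP).length := by omega
      rw [h2, pv_take_takeWhile]
    rw [hslice, pv_count_singleton]
    rw [if_neg (by omega)]

-- inside the change region A and B always differ (the wrapped token is strictly longer)
theorem pv_tight (linha : String) (i : Int)
    (hpre : Pre_estadoNumero linha i) (hD : D_estadoNumero linha i) :
    estadoNumero linha i ≠ estadoNumero_alt linha i := by
  unfold Pre_estadoNumero at hpre
  unfold D_estadoNumero at hD
  simp only [pvP_eq] at hpre hD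
  obtain ⟨hi, hge, hall⟩ := hD
  rw [if_neg (by omega)] at hpre
  obtain ⟨_, hcnt⟩ := hpre
  simp only [estadoNumero, estadoNumero_alt]
  set cs := linha.toList with hcs
  have hn0 : 0 < cs.length := by omega
  have hmi : ((((cs.length : Int) + i).toNat : Nat) : Int) - cs.length = i := by omega
  have hmlt : ((cs.length : Int) + i).toNat < cs.length := by omega
  set m := ((cs.length : Int) + i).toNat with hm
  have hallm : ∀ x ∈ cs.drop m, pvP x = true := List.all_eq_true.mp hall
  have hlen : (cs.drop m).length = cs.length - m := List.length_drop
  have htwlen := (List.takeWhile_prefix (p := pvP) (l := cs)).length_le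
  -- the scanned stream splits as suffix ++ (prefix run of the whole line)
  have hstream : ((cs.drop m ++ cs).takeWhile pvP) = cs.drop m ++ cs.takeWhile pvP := by
    rw [List.takeWhile_append,
      if_pos (by rw [List.takeWhile_eq_self_iff.mpr hallm])]
  rw [hstream, List.count_append] at hcnt
  -- A: consume the suffix, wrap to 0, consume the prefix run
  have hfe : ((cs.length : Int) - i).toNat + 1 = (cs.length - m) + (cs.length + 1) := by omega
  have hcge : '.' ∈ cs.drop m → 1 ≤ (cs.drop m).count '.' := fun hmem =>
    List.count_pos_iff.mpr hmem
  have hA1 := pvA_wrap cs (cs.length + 1) (cs.length - m) m [] false (by omega) hallm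
    (by simp only [Bool.false_eq_true, if_false, add_zero]; omega)
  have hA2 := pvA_nonneg cs (cs.length + 1) 0 ([] ++ cs.drop m) ((cs.drop m).contains '.')
    (by omega)
    (by
      simp only [List.drop_zero]
      by_cases hcon : (cs.drop m).contains '.'
      · have hmem : '.' ∈ cs.drop m := by simpa using hcon
        have := hcge hmem
        simp only [hcon, if_true]
        omega
      · simp only [hcon, Bool.false_eq_true, if_false]
        omega)
  rw [hmi] at hA1
  simp only [Bool.false_or] at hA1
  rw [hfe, hA1]
  simp only [Nat.cast_zero, List.drop_zero] at hA2
  rw [hA2]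
  -- B: wrap the scan, token is the clamped slice
  have hB1 := pvB_wrap cs (cs.length + 1) (cs.length - m) m (by omega) hallm
  have hB2 := pvB_nonneg cs (cs.length + 1) 0 (by omega)
  rw [hmi] at hB1
  rw [hB1]
  simp only [Nat.cast_zero, List.drop_zero, zero_add] at hB2
  rw [hB2]
  -- compare the first components by length
  intro heq
  have h1 := congrArg (fun p => p.1.toList.length) heq
  simp only [List.nil_append] at h1
  have hia : PySem.List.clampIdx cs.length i = m := by
    rw [pv_clampIdx_neg _ _ (by omega) hge]
  have hja : PySem.List.clampIdx cs.length ((cs.takeWhile pvP).length : Int)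
      = (cs.takeWhile pvP).length := by
    rw [PySem.List.clampIdx_natCast]; omega
  by_cases hbig : 1 < PySem.Chars.count
      (PySem.List.slice cs (some i) (some ((cs.takeWhile pvP).length : Int))) ['.']
  · rw [if_pos hbig] at h1
    simp only [String.toList_ofList] at h1
    have : ("" : String).toList = [] := rfl
    rw [this] at h1
    simp only [List.length_append, List.length_nil] at h1
    omega
  · rw [if_neg hbig] at h1
    simp only [String.toList_ofList] at h1
    have hsl : (PySem.List.slice cs (some i) (some ((cs.takeWhile pvP).length : Int))).length
        ≤ (cs.takeWhile pvP).length := by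
      simp only [PySem.List.slice]
      rw [hia, hja]
      simp only [List.length_take]
      omega
    simp only [List.length_append] at h1
    omega

-- ===== VERDICT (by name: the statement is the Claim_ definition above) =====
theorem estadoNumero_spec : Claim_unchanged_estadoNumero := by
  intro linha i _hdom hpre
  intro hnd
  exact pv_main linha i hpre hnd

theorem estadoNumero_changed : Claim_changed_estadoNumero := by
  unfold Claim_changed_estadoNumero pvDiffWitness_estadoNumero pvDiffWitnessOut_estadoNumero
  have h : ("1" : String).toList = ['1'] := rfl
  refine ⟨?_, ?_, ?_, ?_, ?_, by decide⟩
  · unfold Dom_estadoNumero pvDomStr pvDomInt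
    rw [h]; decide
  · unfold Pre_estadoNumero
    rw [h]; decide
  · unfold D_estadoNumero
    rw [h]; decide
  · simp only [estadoNumero, h]
    norm_num
    rw [show Int.toNat 2 + 1 = 3 from by decide]
    have hl : estadoNumeroLoop ['1'] 3 [] false (-1) = (['1', '1'], 1) := by decide
    rw [hl]
    simp
  · simp only [estadoNumero_alt, h]
    norm_num
    rw [show Int.toNat 2 + 1 = 3 from by decide]
    have hl : estadoNumeroAltScan ['1'] 3 (-1) = 1 := by decide
    rw [hl]
    have hs : PySem.List.slice ['1'] (some (-1)) (some 1) = ['1'] := by decide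
    rw [hs]
    simp [pv_count_singleton]

theorem estadoNumero_tight : Claim_exact_estadoNumero := by
  intro linha i _hdom hpre hD
  exact pv_tight linha i hpre hD
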